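-- pv_equiv track=rewrite | github.com/amararora07/CodeFights | isSumOfConsecutive.py | isSumOfConsecutive
-- ===== SOURCE A (Python) =====
-- def isSumOfConsecutive(n):
--     for i in range(1,n):
--         t,s=n,i
--         while t>0:
--             t-=s
--             s+=1
--         if t==0:
--             return True
--     return False
-- ===== SOURCE B (Python) =====
-- def isSumOfConsecutive(n):
--     # n is a sum of >=2 consecutive positive integers iff n >= 3 and n is not a power of two
--     return n >= 3 and (n & (n - 1)) != 0
-- ===== Notes on version B (the rewrite author's own statement) =====
-- stated objective: faster
-- what changed: Replaces the double loop that tries every start and subtracts terms one by one with the O(1) bit trick: n is a sum of consecutive positive integers iff n >= 3 and n & (n-1) != 0 (n is not a power of two).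
import Mathlib
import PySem

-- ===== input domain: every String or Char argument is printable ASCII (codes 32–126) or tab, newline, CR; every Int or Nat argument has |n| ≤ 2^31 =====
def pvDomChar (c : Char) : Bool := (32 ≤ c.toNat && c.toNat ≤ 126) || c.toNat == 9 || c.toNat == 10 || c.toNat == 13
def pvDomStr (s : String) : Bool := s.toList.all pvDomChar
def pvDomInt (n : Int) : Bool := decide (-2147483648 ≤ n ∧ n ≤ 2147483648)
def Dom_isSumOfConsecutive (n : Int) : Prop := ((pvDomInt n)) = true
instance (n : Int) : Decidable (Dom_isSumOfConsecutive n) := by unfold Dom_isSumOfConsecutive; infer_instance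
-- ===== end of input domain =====

-- B replaces A's trial of every start with term-by-term subtraction by the O(1) bit test
-- "n >= 3 and n & (n-1) != 0" (n is not a power of two); objective: faster.

-- ===== PORT A =====
-- inner loop `while t > 0: t -= s; s += 1`; the fuel only makes the same computation
-- total (with s ≥ 1, t drops by at least 1 per step, so t.toNat steps always suffice)
def pvWhileA : Nat → Int → Int → Int
  | 0, t, _ => t
  | fuel + 1, t, s => if 0 < t then pvWhileA fuel (t - s) (s + 1) else t

def isSumOfConsecutive (n : Int) : Bool :=
  (PySem.List.pyRange 1 n 1).any (fun i => pvWhileA n.toNat n i == 0)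

-- ===== PORT B =====
def isSumOfConsecutive_alt (n : Int) : Bool :=
  decide (3 ≤ n) && (Int.land n (n - 1) != 0)

-- ===== PRECONDITION & SPEC =====
def Spec_isSumOfConsecutive (n : Int) (out : Bool) : Prop := out = isSumOfConsecutive_alt n
instance (n : Int) (out : Bool) : Decidable (Spec_isSumOfConsecutive n out) := by unfold Spec_isSumOfConsecutive; infer_instance

-- ===== CLAIM (what is proved, stated in full; the proofs are below) =====
def Claim_equal_isSumOfConsecutive : Prop := ∀ (n : Int), Dom_isSumOfConsecutive n → Spec_isSumOfConsecutive n (isSumOfConsecutive n)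

-- ===== LEMMAS AND PROOFS =====

-- the inner while loop ends at exactly 0 only if n is i + (i+1) + ... + (i+k-1) for some k
theorem pvWhileA_sound (fuel : Nat) (t s : Int) (hs : 1 ≤ s)
    (h : pvWhileA fuel t s = 0) : ∃ k : Nat, 2 * t = (k : Int) * (2 * s + k - 1) := by
  induction fuel generalizing t s with
  | zero =>
    simp only [pvWhileA] at h
    exact ⟨0, by simp [h]⟩
  | succ f ih =>
    simp only [pvWhileA] at h
    split_ifs at h with ht
    · obtain ⟨k, hk⟩ := ih (t - s) (s + 1) (by omega) h
      refine ⟨k + 1, ?_⟩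
      push_cast at hk ⊢
      linear_combination hk
    · exact ⟨0, by simp [h]⟩

theorem pvWhileA_complete (k : Nat) (fuel : Nat) (t s : Int) (hs : 1 ≤ s)
    (hf : t.toNat ≤ fuel) (hk : 2 * t = (k : Int) * (2 * s + k - 1)) :
    pvWhileA fuel t s = 0 := by
  induction k generalizing fuel t s with
  | zero =>
    have ht : t = 0 := by omega
    cases fuel <;> simp [pvWhileA, ht]
  | succ k ih =>
    have hk' : 2 * t = ((k : Int) + 1) * (2 * s + k) := by push_cast at hk ⊢; linear_combination hk
    have hknn : (0 : Int) ≤ (k : Int) := Int.natCast_nonneg k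
    have ht : 0 < t := by nlinarith
    cases fuel with
    | zero => omega
    | succ f =>
      simp only [pvWhileA, if_pos ht]
      refine ih f (t - s) (s + 1) (by omega) (by omega) ?_
      linarith [hk']

-- A returns true iff n = i + (i+1) + ... + (i+k-1) for some start 1 ≤ i < n
theorem isSumOfConsecutive_iff (n : Int) :
    isSumOfConsecutive n = true ↔
      ∃ i : Int, 1 ≤ i ∧ i < n ∧ ∃ k : Nat, 2 * n = (k : Int) * (2 * i + k - 1) := by
  unfold isSumOfConsecutive
  rw [List.any_eq_true]
  constructor
  · rintro ⟨i, hmem, hz⟩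
    rw [PySem.List.mem_pyRange_one] at hmem
    have h0 : pvWhileA n.toNat n i = 0 := by simpa using hz
    exact ⟨i, hmem.1, hmem.2, pvWhileA_sound _ _ _ hmem.1 h0⟩
  · rintro ⟨i, h1, h2, k, hk⟩
    refine ⟨i, PySem.List.mem_pyRange_one.mpr ⟨h1, h2⟩, ?_⟩
    simp [pvWhileA_complete k n.toNat n i h1 le_rfl hk]

-- number theory: such a representation exists iff 3 ≤ n and n is not a power of two
theorem rep_iff (n : Int) :
    (∃ i : Int, 1 ≤ i ∧ i < n ∧ ∃ k : Nat, 2 * n = (k : Int) * (2 * i + k - 1)) ↔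
      (3 ≤ n ∧ ¬ ∃ j : Nat, n.toNat = 2 ^ j) := by
  constructor
  · rintro ⟨i, hi1, hin, k, hk⟩
    have hn2 : (2 : Int) ≤ n := by omega
    have hk2 : 2 ≤ k := by
      rcases k with _ | _ | k
      · exfalso; push_cast at hk; omega
      · exfalso; push_cast at hk; omega
      · omega
    -- pass to ℕ
    obtain ⟨N, rfl⟩ : ∃ N : Nat, n = (N : Int) := ⟨n.toNat, by omega⟩
    obtain ⟨I, rfl⟩ : ∃ I : Nat, i = (I : Int) := ⟨i.toNat, by omega⟩
    have hI1 : 1 ≤ I := by exact_mod_cast hi1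
    have hkN : 2 * N = k * (2 * I + k - 1) := by
      have hc : ((k * (2 * I + k - 1) : Nat) : Int) = ((2 * N : Nat) : Int) := by
        push_cast [Nat.cast_sub (show 1 ≤ 2 * I + k by omega)]
        linarith [hk]
      exact_mod_cast hc.symm
    obtain ⟨L, hLdef⟩ : ∃ L : Nat, L = 2 * I + k - 1 := ⟨_, rfl⟩
    rw [← hLdef] at hkN
    have hL3 : k + 1 ≤ L := by omega
    -- the odd factor d ≥ 3 of 2N divides N
    obtain ⟨d, hd_odd, hd3, hd_dvd⟩ : ∃ d, d % 2 = 1 ∧ 3 ≤ d ∧ d ∣ 2 * N := by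
      rcases Nat.even_or_odd k with he | ho
      · have hke : k % 2 = 0 := Nat.even_iff.mp he
        exact ⟨L, by omega, by omega, ⟨k, by rw [hkN]; ring⟩⟩
      · have hko : k % 2 = 1 := Nat.odd_iff.mp ho
        exact ⟨k, hko, by omega, ⟨L, hkN⟩⟩
    have hcop : Nat.Coprime d 2 :=
      (Nat.Prime.coprime_iff_not_dvd Nat.prime_two |>.mpr (by omega)).symm
    have hdN : d ∣ N := Nat.Coprime.dvd_of_dvd_mul_left hcop hd_dvd
    have hN3 : 3 ≤ N := le_trans hd3 (Nat.le_of_dvd (by omega) hdN)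
    refine ⟨by exact_mod_cast hN3, ?_⟩
    rintro ⟨j, hj⟩
    have hNj : N = 2 ^ j := by omega
    have hdvd_pow : d ∣ 2 ^ j := hNj ▸ hdN
    have hd1 : d = 1 := Nat.Coprime.eq_one_of_dvd (Nat.Coprime.pow_right j hcop) hdvd_pow
    omega
  · rintro ⟨h3, hnp⟩
    obtain ⟨N, rfl⟩ : ∃ N : Nat, n = (N : Int) := ⟨n.toNat, by omega⟩
    have hN3 : 3 ≤ N := by exact_mod_cast h3
    have hnp' : ¬ ∃ j : Nat, N = 2 ^ j := by
      rintro ⟨j, hj⟩; exact hnp ⟨j, by omega⟩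
    obtain ⟨a, m, hm_odd, hNm⟩ := Nat.exists_eq_two_pow_mul_odd (by omega : N ≠ 0)
    have hm2 : m % 2 = 1 := Nat.odd_iff.mp hm_odd
    have hm3 : 3 ≤ m := by
      rcases Nat.lt_or_ge m 3 with h | h
      · interval_cases m
        · omega
        · exact absurd ⟨a, by omega⟩ hnp'
        · omega
      · exact h
    have hMeven : 2 ^ (a + 1) % 2 = 0 := by
      have : (2 : Nat) ∣ 2 ^ (a + 1) := dvd_pow_self 2 (Nat.succ_ne_zero a)
      omega
    have hM2 : 2 ≤ 2 ^ (a + 1) := by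
      calc (2 : Nat) = 2 ^ 1 := by norm_num
      _ ≤ 2 ^ (a + 1) := Nat.pow_le_pow_right (by norm_num) (by omega)
    have h2N : 2 * N = 2 ^ (a + 1) * m := by rw [hNm]; ring
    -- k = smaller factor, L = larger factor of 2N (opposite parity, so distinct)
    obtain ⟨k, L, hk2, hkL, hpar, hprod⟩ :
        ∃ k L : Nat, 2 ≤ k ∧ k + 1 ≤ L ∧ (k + L) % 2 = 1 ∧ k * L = 2 * N := by
      rcases Nat.le_total (2 ^ (a + 1)) m with h | h
      · exact ⟨2 ^ (a + 1), m, hM2, by omega, by omega, h2N.symm⟩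
      · exact ⟨m, 2 ^ (a + 1), by omega, by omega, by omega, by rw [h2N]; ring⟩
    have hQ : 2 * ((L + 1 - k) / 2) = L + 1 - k := by omega
    have h2L : 2 * L ≤ k * L := Nat.mul_le_mul hk2 (le_refl L)
    refine ⟨((L + 1 - k) / 2 : Nat), ?_, ?_, k, ?_⟩
    · have h1 : 1 ≤ (L + 1 - k) / 2 := by omega
      exact_mod_cast Nat.one_le_cast.mpr h1
    · have hlt : (L + 1 - k) / 2 < N := by omega
      exact_mod_cast Nat.cast_lt.mpr hlt
    · have hQZ : 2 * (((L + 1 - k) / 2 : Nat) : Int) = (L : Int) + 1 - k := by omega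
      have hprodZ : (k : Int) * (L : Int) = 2 * (N : Int) := by exact_mod_cast hprod
      have hmid : 2 * (((L + 1 - k) / 2 : Nat) : Int) + (k : Int) - 1 = (L : Int) := by
        linarith
      rw [hmid.symm] at hprodZ
      linarith

-- a positive natural ANDed with its predecessor is zero iff it is a power of two
theorem land_pred_eq_zero_iff (a : Nat) (ha : 1 ≤ a) :
    a &&& (a - 1) = 0 ↔ ∃ j : Nat, a = 2 ^ j := by
  constructor
  · intro h
    by_contra hnp
    set j : Nat := a.log2 with hj
    have h1 : 2 ^ j ≤ a := Nat.log2_self_le (by omega)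
    have h2 : a < 2 ^ (j + 1) := Nat.lt_log2_self
    have hne : a ≠ 2 ^ j := fun he => hnp ⟨j, he⟩
    have hbit_a : a.testBit j = true := by
      rw [Nat.testBit_eq_decide_div_mod_eq]
      have hd : a / 2 ^ j = 1 := by
        rw [pow_succ] at h2
        exact Nat.div_eq_of_lt_le (by omega) (by omega)
      simp [hd]
    have hbit_a1 : (a - 1).testBit j = true := by
      rw [Nat.testBit_eq_decide_div_mod_eq]
      have hd : (a - 1) / 2 ^ j = 1 := by
        rw [pow_succ] at h2
        exact Nat.div_eq_of_lt_le (by omega) (by omega)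
      simp [hd]
    have := congrArg (fun x => Nat.testBit x j) h
    simp [hbit_a, hbit_a1, Nat.zero_testBit] at this
  · rintro ⟨j, rfl⟩
    apply Nat.eq_of_testBit_eq
    intro i
    simp only [Nat.testBit_land, Nat.testBit_two_pow, Nat.testBit_two_pow_sub_one,
      Nat.zero_testBit, Bool.and_eq_false_iff]
    rcases Nat.lt_or_ge i j with h | h
    · left; simp; omega
    · right; simp; omega

-- land on nonnegative integers agrees with land on the naturals
theorem land_cast (N : Nat) (h : 1 ≤ N) :
    Int.land (N : Int) ((N : Int) - 1) = ((N &&& (N - 1) : Nat) : Int) := by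
  have h2 : (N : Int) - 1 = ((N - 1 : Nat) : Int) := by omega
  rw [h2]; rfl

-- B returns true iff 3 ≤ n and n is not a power of two
theorem isSumOfConsecutive_alt_iff (n : Int) :
    isSumOfConsecutive_alt n = true ↔ (3 ≤ n ∧ ¬ ∃ j : Nat, n.toNat = 2 ^ j) := by
  unfold isSumOfConsecutive_alt
  simp only [Bool.and_eq_true, decide_eq_true_eq, bne_iff_ne, ne_eq]
  constructor
  · rintro ⟨h3, hland⟩
    refine ⟨h3, fun hp => hland ?_⟩
    obtain ⟨N, rfl⟩ : ∃ N : Nat, n = (N : Int) := ⟨n.toNat, by omega⟩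
    have hN1 : 1 ≤ N := by exact_mod_cast (by omega : (1 : Int) ≤ (N : Int))
    obtain ⟨j, hj⟩ := hp
    have hland0 : N &&& (N - 1) = 0 :=
      (land_pred_eq_zero_iff N hN1).mpr ⟨j, by omega⟩
    rw [land_cast N hN1, hland0]; rfl
  · rintro ⟨h3, hnp⟩
    refine ⟨h3, fun h0 => hnp ?_⟩
    obtain ⟨N, rfl⟩ : ∃ N : Nat, n = (N : Int) := ⟨n.toNat, by omega⟩
    have hN1 : 1 ≤ N := by exact_mod_cast (by omega : (1 : Int) ≤ (N : Int))
    rw [land_cast N hN1] at h0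
    obtain ⟨j, hj⟩ := (land_pred_eq_zero_iff N hN1).mp (by exact_mod_cast h0)
    exact ⟨j, by omega⟩

-- ===== VERDICT (by name: the statement is the Claim_ definition above) =====
theorem isSumOfConsecutive_spec : Claim_equal_isSumOfConsecutive := by
  intro n _
  unfold Spec_isSumOfConsecutive
  rw [Bool.eq_iff_iff, isSumOfConsecutive_iff, isSumOfConsecutive_alt_iff, rep_iff]
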